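-- pv_equiv track=rewrite | github.com/pypi-data/pypi-mirror-288 | packages/TransMCL/TransMCL-1.0.0-py3-none-any.whl/TransMCL/algorithms.py | KeepTopReuslts
-- ===== SOURCE A (Python) =====
-- def KeepTopReuslts(list_, keep, pos):
--     """
--         To keep top BLAST hits
--     """
--     out = []
--     count = 0
--     last = list_[0][pos]
--
--     for i, it in enumerate(list_):
--         if it[pos] != last:
--             count = 0
--         if keep and count>=keep:
--             continue
--         out.append(it)
--         count += 1
--         last = it[pos]
--     return out
-- ===== SOURCE B (Python) =====
-- def _span_key(lst, pos, k):
--     """Longest prefix of lst whose item[pos] == k, plus the remainder."""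
--     group = []
--     for i, it in enumerate(lst):
--         if it[pos] != k:
--             return group, lst[i:]
--         group.append(it)
--     return group, []
--
--
-- def KeepTopReuslts(list_, keep, pos):
--     """
--         To keep top BLAST hits
--     """
--     out = []
--     rest = list_
--     while rest:
--         head, tail = rest[0], rest[1:]
--         group, rest = _span_key(tail, pos, head[pos])
--         group = [head] + group
--         out.extend(group if not keep else group[:max(keep, 0)])
--     return out
-- ===== Notes on version B (the rewrite author's own statement) =====
-- stated objective: alternative
-- what changed: A's single streaming pass with count/last bookkeeping is replaced by a group-then-slice decomposition: _span_key splits off each maximal consecutive run of equal key and the loop emits the whole run (keep==0) or its first max(keep,0) items; trades the per-group tail copy for a plainer structure.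
import Mathlib
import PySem

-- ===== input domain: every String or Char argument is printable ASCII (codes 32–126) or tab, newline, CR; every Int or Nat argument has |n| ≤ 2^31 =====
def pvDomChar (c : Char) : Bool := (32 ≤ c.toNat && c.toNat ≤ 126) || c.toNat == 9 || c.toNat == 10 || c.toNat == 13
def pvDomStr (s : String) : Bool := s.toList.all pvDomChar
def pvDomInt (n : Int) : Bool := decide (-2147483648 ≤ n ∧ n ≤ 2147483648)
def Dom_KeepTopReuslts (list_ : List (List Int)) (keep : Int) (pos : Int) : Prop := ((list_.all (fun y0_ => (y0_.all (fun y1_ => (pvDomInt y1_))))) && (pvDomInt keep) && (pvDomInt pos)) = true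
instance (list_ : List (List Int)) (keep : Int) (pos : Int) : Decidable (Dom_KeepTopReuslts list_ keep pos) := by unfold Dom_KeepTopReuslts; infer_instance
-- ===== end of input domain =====

-- B replaces A's streaming counter/last-key bookkeeping by a group-then-slice decomposition
-- (split the list into maximal runs of equal key, emit each run or its keep-prefix); return values agree.

-- ===== PORT A =====
-- it[pos]; an IndexError (pyGet? = none) is excluded by Pre_, so the default is never reached there.
def pvKeyA (it : List Int) (pos : Int) : Int := (PySem.List.pyGet? it pos).getD 0

-- one iteration of A's for-loop over the state (out, count, last)
def pvStepA (keep pos : Int) (st : List (List Int) × Int × Int) (it : List Int) :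
    List (List Int) × Int × Int :=
  let out := st.1
  let count := st.2.1
  let last := st.2.2
  let v := pvKeyA it pos
  let count := if v ≠ last then 0 else count
  if keep ≠ 0 ∧ count ≥ keep then (out, count, last)
  else (out ++ [it], count + 1, v)

def KeepTopReuslts (list_ : List (List Int)) (keep : Int) (pos : Int) : List (List Int) :=
  match list_ with
  | [] => []  -- list_[0] raises IndexError in Python; excluded by Pre_
  | first :: _ =>
    let last := pvKeyA first pos
    (list_.foldl (pvStepA keep pos) ([], 0, last)).1

-- ===== PORT B =====
-- _span_key: longest prefix of lst whose item[pos] == k, plus the remainder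
def pvSpanKey (lst : List (List Int)) (pos k : Int) : List (List Int) × List (List Int) :=
  match lst with
  | [] => ([], [])
  | it :: rest =>
    if pvKeyA it pos ≠ k then ([], it :: rest)
    else
      let (g, r) := pvSpanKey rest pos k
      (it :: g, r)

-- the while loop of B; the Nat fuel (initially the length) only makes the recursion structural:
-- each iteration consumes at least the head, so fuel = length never runs out
def pvLoopB (fuel : Nat) (rest : List (List Int)) (keep pos : Int) : List (List Int) :=
  match fuel, rest with
  | _, [] => []
  | 0, _ :: _ => []
  | Nat.succ m, head :: tail =>
    let p := pvSpanKey tail pos (pvKeyA head pos)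
    let group := head :: p.1
    (if keep = 0 then group else group.take (max keep 0).toNat) ++ pvLoopB m p.2 keep pos

def KeepTopReuslts_alt (list_ : List (List Int)) (keep : Int) (pos : Int) : List (List Int) :=
  pvLoopB list_.length list_ keep pos

-- ===== PRECONDITION & SPEC =====
-- Pre_ excludes exactly the inputs on which Python A raises IndexError: the empty list and any
-- input whose rows make pos an invalid Python index (A indexes every row).
def Pre_KeepTopReuslts (list_ : List (List Int)) (keep : Int) (pos : Int) : Prop :=
  list_ ≠ [] ∧ ∀ it ∈ list_, PySem.Raise.InRange it.length pos
instance (list_ : List (List Int)) (keep : Int) (pos : Int) : Decidable (Pre_KeepTopReuslts list_ keep pos) := by unfold Pre_KeepTopReuslts; infer_instance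
def pvWitness_KeepTopReuslts : List (List Int) × Int × Int := ([[1, 5], [1, 6], [2, 7]], 1, 0)

def Spec_KeepTopReuslts (list_ : List (List Int)) (keep : Int) (pos : Int) (out : List (List Int)) : Prop := out = KeepTopReuslts_alt list_ keep pos
instance (list_ : List (List Int)) (keep : Int) (pos : Int) (out : List (List Int)) : Decidable (Spec_KeepTopReuslts list_ keep pos out) := by unfold Spec_KeepTopReuslts; infer_instance

-- ===== CLAIM (what is proved, stated in full; the proofs are below) =====
def Claim_equal_KeepTopReuslts : Prop := ∀ (list_ : List (List Int)) (keep : Int) (pos : Int), Dom_KeepTopReuslts list_ keep pos → Pre_KeepTopReuslts list_ keep pos → Spec_KeepTopReuslts list_ keep pos (KeepTopReuslts list_ keep pos)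

-- ===== LEMMAS AND PROOFS =====

theorem stepA_char (keep pos : Int) (out : List (List Int)) (c last : Int) (it : List Int) :
    pvStepA keep pos (out, c, last) it =
      if keep ≠ 0 ∧ (if pvKeyA it pos ≠ last then 0 else c) ≥ keep
      then (out, (if pvKeyA it pos ≠ last then 0 else c), last)
      else (out ++ [it], (if pvKeyA it pos ≠ last then 0 else c) + 1, pvKeyA it pos) := rfl

theorem pvSpanKey_len (lst : List (List Int)) (pos k : Int) :
    (pvSpanKey lst pos k).2.length ≤ lst.length := by
  induction lst with
  | nil => simp [pvSpanKey]
  | cons it rest ih =>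
    simp only [pvSpanKey]
    split
    · simp
    · simpa using Nat.le_succ_of_le ih

-- span decomposition: the input is group ++ remainder, group keys are all k, remainder starts ≠ k
theorem pvSpanKey_spec (lst : List (List Int)) (pos k : Int) :
    lst = (pvSpanKey lst pos k).1 ++ (pvSpanKey lst pos k).2 ∧
    (∀ x ∈ (pvSpanKey lst pos k).1, pvKeyA x pos = k) ∧
    (∀ x, ((pvSpanKey lst pos k).2).head? = some x → pvKeyA x pos ≠ k) := by
  induction lst with
  | nil => simp [pvSpanKey]
  | cons it rest ih =>
    simp only [pvSpanKey]
    split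
    · rename_i hne
      refine ⟨rfl, by simp, ?_⟩
      intro x hx
      simp at hx
      subst hx
      exact hne
    · rename_i heq
      rw [not_not] at heq
      obtain ⟨h1, h2, h3⟩ := ih
      refine ⟨?_, ?_, h3⟩
      · simpa using h1
      · intro x hx
        simp at hx
        rcases hx with rfl | hx
        · exact heq
        · exact h2 x hx

-- keep < 0: A skips every element, so out never grows (and last never changes)
theorem stepA_neg (keep pos : Int) (hk : keep < 0) (l : List (List Int)) :
    ∀ out c last, 0 ≤ c →
      ∃ c', l.foldl (pvStepA keep pos) (out, c, last) = (out, c', last) ∧ 0 ≤ c' := by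
  induction l with
  | nil => intro out c last hc; exact ⟨c, rfl, hc⟩
  | cons it rest ih =>
    intro out c last hc
    have hA : pvStepA keep pos (out, c, last) it =
        (out, (if pvKeyA it pos ≠ last then 0 else c), last) := by
      rw [stepA_char, if_pos ⟨by omega, by split <;> omega⟩]
    rw [List.foldl_cons, hA]
    exact ih out _ last (by split <;> omega)

theorem loopB_neg (keep pos : Int) (hk : keep < 0) :
    ∀ fuel (l : List (List Int)), pvLoopB fuel l keep pos = [] := by
  intro fuel
  induction fuel with
  | zero => intro l; cases l <;> rfl
  | succ m ih =>
    intro l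
    cases l with
    | nil => rfl
    | cons head tail =>
      simp only [pvLoopB]
      rw [if_neg (by omega), show (max keep 0).toNat = 0 by omega]
      simp [ih]

-- keep ≥ 0: A's fold over a uniform-key run, starting from counter c, appends the
-- remaining-quota prefix of the run and ends with last = k again
theorem fold_run (keep pos k : Int) (hk : 0 ≤ keep) (g : List (List Int))
    (hg : ∀ x ∈ g, pvKeyA x pos = k) :
    ∀ out c, 0 ≤ c →
      ∃ c', g.foldl (pvStepA keep pos) (out, c, k) =
        (out ++ (if keep = 0 then g else g.take (keep - c).toNat), c', k) ∧ 0 ≤ c' := by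
  induction g with
  | nil => intro out c hc; exact ⟨c, by simp, hc⟩
  | cons it rest ih =>
    intro out c hc
    have hkey : pvKeyA it pos = k := hg it (by simp)
    have hrest : ∀ x ∈ rest, pvKeyA x pos = k := fun x hx => hg x (by simp [hx])
    have hcnt : (if pvKeyA it pos ≠ k then (0 : Int) else c) = c := by
      rw [hkey, if_neg (by omega)]
    by_cases hskip : keep ≠ 0 ∧ c ≥ keep
    · have hA : pvStepA keep pos (out, c, k) it = (out, c, k) := by
        rw [stepA_char, hcnt, if_pos hskip]
      rw [List.foldl_cons, hA]
      obtain ⟨c', h1, h2⟩ := ih hrest out c hc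
      refine ⟨c', ?_, h2⟩
      rw [h1, if_neg hskip.1, if_neg hskip.1,
        show (keep - c).toNat = 0 by omega]
      simp
    · have hA : pvStepA keep pos (out, c, k) it = (out ++ [it], c + 1, k) := by
        rw [stepA_char, hcnt, if_neg hskip, hkey]
      rw [List.foldl_cons, hA]
      obtain ⟨c', h1, h2⟩ := ih hrest (out ++ [it]) (c + 1) (by omega)
      refine ⟨c', ?_, h2⟩
      rw [h1, List.append_assoc]
      by_cases h0 : keep = 0
      · simp [h0]
      · have hlt : c < keep := by
          by_contra hcc
          exact hskip ⟨h0, by omega⟩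
        rw [if_neg h0, if_neg h0,
          show (keep - c).toNat = (keep - (c + 1)).toNat + 1 by omega]
        simp

-- main lemma (keep ≥ 0): at a group boundary (or the very start, where count = 0 and
-- last = first key) A's fold produces exactly B's loop output
theorem fold_eq_loopB (keep pos : Int) (hk : 0 ≤ keep) :
    ∀ n (l : List (List Int)) out c last, l.length ≤ n → 0 ≤ c →
      (∀ x, l.head? = some x → ((c = 0 ∧ last = pvKeyA x pos) ∨ last ≠ pvKeyA x pos)) →
      (l.foldl (pvStepA keep pos) (out, c, last)).1 = out ++ pvLoopB n l keep pos := by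
  intro n
  induction n with
  | zero =>
    intro l out c last hlen _ _
    match l with
    | [] => simp [pvLoopB]
  | succ m ih =>
    intro l out c last hlen hc hb
    match l with
    | [] => simp [pvLoopB]
    | head :: tail =>
      have hbd := hb head (by simp)
      have hcnt : (if pvKeyA head pos ≠ last then (0 : Int) else c) = 0 := by
        rcases hbd with ⟨rfl, rfl⟩ | hne
        · split <;> rfl
        · rw [if_pos (by omega)]
      have hA : pvStepA keep pos (out, c, last) head = (out ++ [head], 1, pvKeyA head pos) := by
        rw [stepA_char, hcnt, if_neg (by omega)]
        norm_num
      obtain ⟨hsplit, hkeys, hhead⟩ := pvSpanKey_spec tail pos (pvKeyA head pos)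
      have hlenr := pvSpanKey_len tail pos (pvKeyA head pos)
      rcases hgr : pvSpanKey tail pos (pvKeyA head pos) with ⟨g, r⟩
      rw [hgr] at hsplit hkeys hhead hlenr
      simp only at hsplit hkeys hhead hlenr
      obtain ⟨c', hrun, hc'⟩ :=
        fold_run keep pos (pvKeyA head pos) hk g hkeys (out ++ [head]) 1 (by omega)
      have hrec := ih r (out ++ [head] ++ (if keep = 0 then g else g.take (keep - 1).toNat)) c'
        (pvKeyA head pos)
        (by simp at hlen; omega) hc'
        (by
          intro x hx
          exact Or.inr (fun h => hhead x hx h.symm))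
      rw [List.foldl_cons, hA]
      conv_lhs => rw [hsplit]
      rw [List.foldl_append, hrun, hrec]
      simp only [pvLoopB, hgr]
      have hgrp : (if keep = 0 then head :: g else (head :: g).take (max keep 0).toNat) =
          head :: (if keep = 0 then g else g.take (keep - 1).toNat) := by
        by_cases h0 : keep = 0
        · simp [h0]
        · rw [if_neg h0, if_neg h0,
            show (max keep 0).toNat = (keep - 1).toNat + 1 by omega]
          simp
      rw [hgrp]
      simp

-- ===== VERDICT (by name: the statement is the Claim_ definition above) =====
theorem KeepTopReuslts_spec : Claim_equal_KeepTopReuslts := by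
  intro list_ keep pos _ hpre
  unfold Spec_KeepTopReuslts KeepTopReuslts_alt
  obtain ⟨hne, -⟩ := hpre
  match list_, hne with
  | first :: rest, _ =>
    have hA : KeepTopReuslts (first :: rest) keep pos =
        ((first :: rest).foldl (pvStepA keep pos) ([], 0, pvKeyA first pos)).1 := rfl
    rw [hA]
    by_cases hk : 0 ≤ keep
    · exact fold_eq_loopB keep pos hk (first :: rest).length (first :: rest) [] 0
        (pvKeyA first pos) le_rfl le_rfl
        (fun x hx => Or.inl ⟨rfl, by simp at hx; rw [hx]⟩)
    · obtain ⟨c', h1, -⟩ := stepA_neg keep pos (by omega) (first :: rest) [] 0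
        (pvKeyA first pos) le_rfl
      rw [h1, loopB_neg keep pos (by omega)]
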